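-- pv_equiv track=rewrite | github.com/PetraVidnerova/aoc_23 | day18.py | horizontal_count
-- ===== SOURCE A (Python) =====
-- def horizontal_count(line):
--     count = 0
--     l = ""
--     for x in line:
--         if x == "|":
--             count += 1
--         elif x in "FJL7":
--             if not l:
--                 l += x
--             else:
--                 l += x
--                 if l in ("L7", "FJ"):
--                     count  += 1
--                 l = ""
--     return count
-- ===== SOURCE B (Python) =====
-- def horizontal_count(line):
--     corners = [c for c in line if c in "FJL7"]
--     total = line.count("|")
--     i = 1
--     while i < len(corners):
--         if corners[i - 1] + corners[i] in ("L7", "FJ"):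
--             total += 1
--         i += 2
--     return total
-- ===== Notes on version B (the rewrite author's own statement) =====
-- stated objective: simpler
-- what changed: A's single stateful pass with a pending-corner string buffer is replaced by an independent pipe-character count plus a filter of the corner characters and a pairwise index scan over that extracted list.
import Mathlib
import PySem

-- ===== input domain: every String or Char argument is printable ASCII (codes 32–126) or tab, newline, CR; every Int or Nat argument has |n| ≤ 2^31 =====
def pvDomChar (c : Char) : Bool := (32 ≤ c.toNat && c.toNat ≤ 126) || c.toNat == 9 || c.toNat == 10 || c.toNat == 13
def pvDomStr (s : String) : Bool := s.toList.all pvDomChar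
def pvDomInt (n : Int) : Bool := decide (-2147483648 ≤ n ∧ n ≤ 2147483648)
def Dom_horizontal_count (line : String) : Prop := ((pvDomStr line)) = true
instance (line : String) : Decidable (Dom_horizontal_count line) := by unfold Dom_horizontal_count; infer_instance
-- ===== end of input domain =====

-- B replaces A's single stateful pass (pending-corner buffer) by an independent pipe-character
-- count plus a pairwise scan over the extracted corner characters; objective: simpler. A is total.
-- Python's one-char strings are represented as Char; A's small string buffer `l`
-- (only ever "", or one corner char, compared with "L7"/"FJ") as its char list — exact.

-- ===== PORT A =====
-- `x in "FJL7"` on a one-char x is exactly char membership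
def pvCorner (x : Char) : Bool := "FJL7".toList.contains x

def pvStepA (st : Int × List Char) (x : Char) : Int × List Char :=
  if x = '|' then (st.1 + 1, st.2)
  else if pvCorner x then
    if st.2 = [] then (st.1, st.2 ++ [x])
    else
      let l := st.2 ++ [x]
      if l = "L7".toList ∨ l = "FJ".toList then (st.1 + 1, [])
      else (st.1, [])
  else st

def horizontal_count (line : String) : Int :=
  (line.toList.foldl pvStepA (0, [])).1

-- ===== PORT B =====
def pvPairLoop (corners : List Char) (i : Nat) (total : Int) : Int :=
  if i < corners.length then
    let pair := [corners.getD (i - 1) ' ', corners.getD i ' ']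
    pvPairLoop corners (i + 2) (if pair = "L7".toList ∨ pair = "FJ".toList then total + 1 else total)
  else total
termination_by corners.length - i

def horizontal_count_alt (line : String) : Int :=
  let corners := line.toList.filter pvCorner
  let total : Int := (PySem.Str.count line "|" : Int)
  pvPairLoop corners 1 total

-- ===== PRECONDITION & SPEC =====
def Spec_horizontal_count (line : String) (out : Int) : Prop := out = horizontal_count_alt line
instance (line : String) (out : Int) : Decidable (Spec_horizontal_count line out) := by unfold Spec_horizontal_count; infer_instance

-- ===== CLAIM (what is proved, stated in full; the proofs are below) =====
def Claim_equal_horizontal_count : Prop := ∀ (line : String), Dom_horizontal_count line → Spec_horizontal_count line (horizontal_count line)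

-- ===== LEMMAS AND PROOFS =====

-- the pair count both programs compute, in structural form
def pvPairs : List Char → Int
  | a :: b :: rest => (if [a, b] = "L7".toList ∨ [a, b] = "FJ".toList then 1 else 0) + pvPairs rest
  | _ => 0

lemma pvCountGo (ch : Char) :
    ∀ (l : List Char) (fuel acc : Nat), l.length ≤ fuel →
      PySem.Chars.count.go [ch] fuel l acc = acc + l.count ch := by
  intro l
  induction l with
  | nil => intro fuel acc _; cases fuel <;> simp [PySem.Chars.count.go]
  | cons a t ih =>
    intro fuel acc hle
    cases fuel with
    | zero => simp at hle
    | succ n =>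
      rw [PySem.Chars.count.go]
      by_cases h : a = ch
      · subst h
        simp only [List.isPrefixOf, List.length_cons, Nat.add_le_add_iff_right] at hle ⊢
        simp [ih n (acc + 1) hle, List.count_cons]
        omega
      · have hp : List.isPrefixOf [ch] (a :: t) = false := by
          simp [List.isPrefixOf]; exact fun hh => absurd hh.symm h
        rw [hp]
        simp only [List.length_cons, Nat.add_le_add_iff_right] at hle
        simp [ih n acc hle, List.count_cons, h]

lemma pvStrCountPipe (line : String) :
    PySem.Str.count line "|" = line.toList.count '|' := by
  simp only [PySem.Str.count_eq]
  show PySem.Chars.count line.toList ['|'] = _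
  rw [PySem.Chars.count]
  simp only [List.isEmpty_cons, if_false, Bool.false_eq_true]
  rw [pvCountGo '|' line.toList line.toList.length 0 (le_refl _)]
  simp

lemma pvPairLoopShift :
    ∀ (n : Nat) (cs : List Char) (a b : Char) (i : Nat) (total : Int),
      cs.length - i ≤ n → 1 ≤ i →
      pvPairLoop (a :: b :: cs) (i + 2) total = pvPairLoop cs i total := by
  intro n
  induction n with
  | zero =>
    intro cs a b i total hn hi
    rw [pvPairLoop]
    conv_rhs => rw [pvPairLoop]
    have h1 : ¬ (i + 2 < cs.length + 1 + 1) := by omega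
    have h2 : ¬ (i < cs.length) := by omega
    simp [List.length_cons, h1, h2]
  | succ n ih =>
    intro cs a b i total hn hi
    by_cases h : i < cs.length
    · obtain ⟨j, rfl⟩ : ∃ j, i = j + 1 := ⟨i - 1, by omega⟩
      have h1 : j + 1 + 2 < cs.length + 1 + 1 := by omega
      rw [pvPairLoop]
      simp only [List.length_cons, if_pos h1]
      have e1 : (a :: b :: cs).getD (j + 1 + 2 - 1) ' ' = cs.getD (j + 1 - 1) ' ' := rfl
      have e2 : (a :: b :: cs).getD (j + 1 + 2) ' ' = cs.getD (j + 1) ' ' := rfl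
      rw [e1, e2, ih cs a b (j + 1 + 2) _ (by omega) (by omega)]
      conv_rhs => rw [pvPairLoop]
      simp only [if_pos h]
    · rw [pvPairLoop]
      conv_rhs => rw [pvPairLoop]
      have h1 : ¬ (i + 2 < cs.length + 1 + 1) := by omega
      simp [List.length_cons, h1, h]

lemma pvPairLoopEq : ∀ (cs : List Char) (total : Int),
    pvPairLoop cs 1 total = total + pvPairs cs := by
  intro cs
  induction cs using pvPairs.induct with
  | case1 a b rest ih =>
    intro total
    rw [pvPairLoop]
    have h1 : 1 < (a :: b :: rest).length := by simp
    simp only [if_pos h1]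
    have e1 : (a :: b :: rest).getD (1 - 1) ' ' = a := rfl
    have e2 : (a :: b :: rest).getD 1 ' ' = b := rfl
    rw [e1, e2, pvPairLoopShift rest.length rest a b 1 _ (by omega) (by omega), ih]
    rw [pvPairs]
    split <;> omega
  | case2 cs h =>
    intro total
    rw [pvPairLoop]
    rcases cs with _ | ⟨a, _ | ⟨b, rest⟩⟩
    · simp [pvPairs]
    · simp [pvPairs]
    · exact (h a b rest rfl).elim

lemma pvFoldAEq : ∀ (cs : List Char) (count : Int) (l : List Char), l.length ≤ 1 →
    (cs.foldl pvStepA (count, l)).1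
      = count + (cs.count '|' : Int) + pvPairs (l ++ cs.filter pvCorner) := by
  intro cs
  induction cs with
  | nil =>
    intro count l hl
    match l, hl with
    | [], _ => simp [pvPairs]
    | [c], _ => simp [pvPairs]
  | cons x cs ih =>
    intro count l hl
    by_cases hx : x = '|'
    · subst hx
      have hc : pvCorner '|' = false := by decide
      have step : pvStepA (count, l) '|' = (count + 1, l) := by simp [pvStepA]
      have hf : List.filter pvCorner ('|' :: cs) = List.filter pvCorner cs := by
        simp [List.filter_cons, hc]
      have hcnt : List.count '|' ('|' :: cs) = List.count '|' cs + 1 := by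
        simp [List.count_cons]
      rw [List.foldl_cons, step, ih (count + 1) l hl, hf, hcnt]
      push_cast
      ring
    · have hcnt : List.count '|' (x :: cs) = List.count '|' cs := by
        simp [List.count_cons, hx]
      by_cases hcor : pvCorner x = true
      · have hf : List.filter pvCorner (x :: cs) = x :: List.filter pvCorner cs := by
          simp [List.filter_cons, hcor]
        match l, hl with
        | [], _ =>
          have step : pvStepA (count, []) x = (count, [x]) := by
            simp [pvStepA, hx, hcor]
          rw [List.foldl_cons, step, ih count [x] (by simp), hcnt, hf]
          rfl
        | [c], _ =>
          by_cases hgood : ([c, x] = "L7".toList ∨ [c, x] = "FJ".toList)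
          · have step : pvStepA (count, [c]) x = (count + 1, []) := by
              simp only [pvStepA, if_neg hx, hcor, if_true, List.cons_append,
                List.nil_append, reduceCtorEq, ite_false]
              rw [if_pos hgood]
            rw [List.foldl_cons, step, ih (count + 1) [] (by simp), hcnt, hf]
            have hp : pvPairs ([c] ++ x :: List.filter pvCorner cs)
                = 1 + pvPairs (List.filter pvCorner cs) := by
              show pvPairs (c :: x :: List.filter pvCorner cs) = _
              rw [pvPairs, if_pos hgood]
            rw [hp, List.nil_append]
            ring
          · have step : pvStepA (count, [c]) x = (count, []) := by
              simp only [pvStepA, if_neg hx, hcor, if_true, List.cons_append,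
                List.nil_append, reduceCtorEq, ite_false]
              rw [if_neg hgood]
            rw [List.foldl_cons, step, ih count [] (by simp), hcnt, hf]
            have hp : pvPairs ([c] ++ x :: List.filter pvCorner cs)
                = 0 + pvPairs (List.filter pvCorner cs) := by
              show pvPairs (c :: x :: List.filter pvCorner cs) = _
              rw [pvPairs, if_neg hgood]
            rw [hp, List.nil_append]
            ring
      · have hcor' : pvCorner x = false := by simpa using hcor
        have hf : List.filter pvCorner (x :: cs) = List.filter pvCorner cs := by
          simp [List.filter_cons, hcor']
        have step : pvStepA (count, l) x = (count, l) := by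
          simp [pvStepA, hx, hcor']
        rw [List.foldl_cons, step, ih count l hl, hcnt, hf]

-- ===== VERDICT (by name: the statement is the Claim_ definition above) =====
theorem horizontal_count_spec : Claim_equal_horizontal_count := by
  intro line _
  unfold Spec_horizontal_count horizontal_count horizontal_count_alt
  rw [pvFoldAEq line.toList 0 [] (by simp), pvPairLoopEq, pvStrCountPipe]
  simp
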